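-- pv_equiv track=rewrite | github.com/joshstern1/MD_reduction | scripts/network_tb_gen.py | initial_gen
-- ===== SOURCE A (Python) =====
-- def initial_gen(size):
--     initial=""
--     tag=""
--     tmp=""
--     for i in range(0,size):
--         for j in range(0,size):
--             for k in range(0,size):
--                 tag="_"+str(i)+"_"+str(j)+"_"+str(k)
--                 tmp="\tinitial $readmemh(\"C:/Users/Jiayi/Documents/GitHub/MD_reduction/tables/routing_tables/routing_table"+tag+"_local.txt\",net0.n"+tag+".local_unit_inst.routing_table);\n"
--                 tmp+="\tinitial $readmemh(\"C:/Users/Jiayi/Documents/GitHub/MD_reduction/tables/routing_tables/routing_table"+tag+"_xpos.txt\",net0.n"+tag+".switch_inst.XPOS.routing_table);\n"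
--                 tmp+="\tinitial $readmemh(\"C:/Users/Jiayi/Documents/GitHub/MD_reduction/tables/routing_tables/routing_table"+tag+"_xneg.txt\",net0.n"+tag+".switch_inst.XNEG.routing_table);\n"
--                 tmp+="\tinitial $readmemh(\"C:/Users/Jiayi/Documents/GitHub/MD_reduction/tables/routing_tables/routing_table"+tag+"_ypos.txt\",net0.n"+tag+".switch_inst.YPOS.routing_table);\n"
--                 tmp+="\tinitial $readmemh(\"C:/Users/Jiayi/Documents/GitHub/MD_reduction/tables/routing_tables/routing_table"+tag+"_yneg.txt\",net0.n"+tag+".switch_inst.YNEG.routing_table);\n"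
--                 tmp+="\tinitial $readmemh(\"C:/Users/Jiayi/Documents/GitHub/MD_reduction/tables/routing_tables/routing_table"+tag+"_zpos.txt\",net0.n"+tag+".switch_inst.ZPOS.routing_table);\n"
--                 tmp+="\tinitial $readmemh(\"C:/Users/Jiayi/Documents/GitHub/MD_reduction/tables/routing_tables/routing_table"+tag+"_zneg.txt\",net0.n"+tag+".switch_inst.ZNEG.routing_table);\n"
--                 tmp+="\tinitial $readmemh(\"C:/Users/Jiayi/Documents/GitHub/MD_reduction/tables/multicast_tables/multicast_table"+tag+"_xpos.txt\",net0.n"+tag+".switch_inst.XPOS.multicast_table);\n"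
--                 tmp+="\tinitial $readmemh(\"C:/Users/Jiayi/Documents/GitHub/MD_reduction/tables/multicast_tables/multicast_table"+tag+"_xneg.txt\",net0.n"+tag+".switch_inst.XNEG.multicast_table);\n"
--                 tmp+="\tinitial $readmemh(\"C:/Users/Jiayi/Documents/GitHub/MD_reduction/tables/multicast_tables/multicast_table"+tag+"_ypos.txt\",net0.n"+tag+".switch_inst.YPOS.multicast_table);\n"
--                 tmp+="\tinitial $readmemh(\"C:/Users/Jiayi/Documents/GitHub/MD_reduction/tables/multicast_tables/multicast_table"+tag+"_yneg.txt\",net0.n"+tag+".switch_inst.YNEG.multicast_table);\n"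
--                 tmp+="\tinitial $readmemh(\"C:/Users/Jiayi/Documents/GitHub/MD_reduction/tables/multicast_tables/multicast_table"+tag+"_zpos.txt\",net0.n"+tag+".switch_inst.ZPOS.multicast_table);\n"
--                 tmp+="\tinitial $readmemh(\"C:/Users/Jiayi/Documents/GitHub/MD_reduction/tables/multicast_tables/multicast_table"+tag+"_zneg.txt\",net0.n"+tag+".switch_inst.ZNEG.multicast_table);\n"
--                 tmp+="\tinitial $readmemh(\"C:/Users/Jiayi/Documents/GitHub/MD_reduction/tables/reduction_tables/reduction_table"+tag+"_xpos.txt\",net0.n"+tag+".switch_inst.XPOS.reduction_table);\n"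
--                 tmp+="\tinitial $readmemh(\"C:/Users/Jiayi/Documents/GitHub/MD_reduction/tables/reduction_tables/reduction_table"+tag+"_xneg.txt\",net0.n"+tag+".switch_inst.XNEG.reduction_table);\n"
--                 tmp+="\tinitial $readmemh(\"C:/Users/Jiayi/Documents/GitHub/MD_reduction/tables/reduction_tables/reduction_table"+tag+"_ypos.txt\",net0.n"+tag+".switch_inst.YPOS.reduction_table);\n"
--                 tmp+="\tinitial $readmemh(\"C:/Users/Jiayi/Documents/GitHub/MD_reduction/tables/reduction_tables/reduction_table"+tag+"_yneg.txt\",net0.n"+tag+".switch_inst.YNEG.reduction_table);\n"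
--                 tmp+="\tinitial $readmemh(\"C:/Users/Jiayi/Documents/GitHub/MD_reduction/tables/reduction_tables/reduction_table"+tag+"_zpos.txt\",net0.n"+tag+".switch_inst.ZPOS.reduction_table);\n"
--                 tmp+="\tinitial $readmemh(\"C:/Users/Jiayi/Documents/GitHub/MD_reduction/tables/reduction_tables/reduction_table"+tag+"_zneg.txt\",net0.n"+tag+".switch_inst.ZNEG.reduction_table);\n"
--
--
--                 initial+=tmp
--     initial+='''	initial begin
-- 		clk=0;
-- 		rst=1;
--
-- 		#100 rst=0;
-- 	end\n'''
--     return initial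
-- ===== SOURCE B (Python) =====
-- _BASE = '\tinitial $readmemh("C:/Users/Jiayi/Documents/GitHub/MD_reduction/tables/'
--
-- _TRAILER = '''	initial begin
-- 		clk=0;
-- 		rst=1;
--
-- 		#100 rst=0;
-- 	end\n'''
--
--
-- def _segments():
--     # Derive the per-node text from the table kinds and the direction strings.
--     # Each $readmemh line is  a + tag + b + tag + c  with
--     #   a = _BASE + kind + '_tables/' + kind + '_table'
--     #   b = '_' + suffix + '.txt",net0.n'
--     #   c = '.' + path + ');\n'
--     # so a whole node block is tag.join(segs) for the segment list built here.
--     trips = [('routing', 'local', 'local_unit_inst.routing_table')]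
--     for kind in ('routing', 'multicast', 'reduction'):
--         for axis in 'xyz':
--             for sign in ('pos', 'neg'):
--                 d = axis + sign
--                 trips.append((kind, d, 'switch_inst.' + d.upper() + '.' + kind + '_table'))
--     segs = []
--     tail = ''
--     for kind, suffix, path in trips:
--         segs.append(tail + _BASE + kind + '_tables/' + kind + '_table')
--         segs.append('_' + suffix + '.txt",net0.n')
--         tail = '.' + path + ');\n'
--     segs.append(tail)
--     return segs
--
-- _SEGS = _segments()
--
--
-- def initial_gen(size):
--     # one flat loop over the node indices; (i,j,k) recovered by divmod
--     parts = []
--     for n in range(size * size * size):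
--         i, r = divmod(n, size * size)
--         j, k = divmod(r, size)
--         parts.append(('_%d_%d_%d' % (i, j, k)).join(_SEGS))
--     parts.append(_TRAILER)
--     return ''.join(parts)
-- ===== Notes on version B (the rewrite author's own statement) =====
-- stated objective: alternative
-- what changed: A walks three nested i/j/k loops and concatenates nineteen fully hard-coded $readmemh statements per node; B runs one flat loop over the size^3 node indices, recovers (i,j,k) by divmod, and derives every folder/file/instance-path name from the table kind and the direction string (d.upper()) instead of hard-coding the statements, joining the collected parts once.
import Mathlib
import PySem

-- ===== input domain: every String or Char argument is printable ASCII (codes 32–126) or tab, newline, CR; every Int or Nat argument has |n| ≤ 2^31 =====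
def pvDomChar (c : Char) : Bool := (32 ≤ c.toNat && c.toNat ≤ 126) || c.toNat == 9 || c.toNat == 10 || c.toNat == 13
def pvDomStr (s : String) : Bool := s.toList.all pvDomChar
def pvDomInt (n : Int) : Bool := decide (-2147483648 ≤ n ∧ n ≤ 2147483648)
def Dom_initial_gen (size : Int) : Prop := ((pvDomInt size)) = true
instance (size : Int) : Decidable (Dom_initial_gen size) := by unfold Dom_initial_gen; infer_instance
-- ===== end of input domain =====

-- B traverses the size^3 nodes with ONE flat loop, recovering (i,j,k) by divmod, and derives
-- every file/field name from the table kind and the direction strings instead of A's nineteen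
-- hard-coded statements per node (objective: alternative); the returned string is identical.

-- ===== PORT A =====
def initial_gen (size : Int) : String :=
  let initial : String := ""
  let initial := (PySem.List.pyRange 0 size 1).foldl (fun initial i =>
    (PySem.List.pyRange 0 size 1).foldl (fun initial j =>
      (PySem.List.pyRange 0 size 1).foldl (fun initial k =>
        let tag := "_" ++ PySem.Int.toStr i ++ "_" ++ PySem.Int.toStr j ++ "_" ++ PySem.Int.toStr k
        let tmp := ("\tinitial $readmemh(\"C:/Users/Jiayi/Documents/GitHub/MD_reduction/tables/routing_tables/routing_table" ++ tag ++ "_local.txt\",net0.n" ++ tag ++ ".local_unit_inst.routing_table);\n")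
        let tmp := tmp ++ ("\tinitial $readmemh(\"C:/Users/Jiayi/Documents/GitHub/MD_reduction/tables/routing_tables/routing_table" ++ tag ++ "_xpos.txt\",net0.n" ++ tag ++ ".switch_inst.XPOS.routing_table);\n")
        let tmp := tmp ++ ("\tinitial $readmemh(\"C:/Users/Jiayi/Documents/GitHub/MD_reduction/tables/routing_tables/routing_table" ++ tag ++ "_xneg.txt\",net0.n" ++ tag ++ ".switch_inst.XNEG.routing_table);\n")
        let tmp := tmp ++ ("\tinitial $readmemh(\"C:/Users/Jiayi/Documents/GitHub/MD_reduction/tables/routing_tables/routing_table" ++ tag ++ "_ypos.txt\",net0.n" ++ tag ++ ".switch_inst.YPOS.routing_table);\n")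
        let tmp := tmp ++ ("\tinitial $readmemh(\"C:/Users/Jiayi/Documents/GitHub/MD_reduction/tables/routing_tables/routing_table" ++ tag ++ "_yneg.txt\",net0.n" ++ tag ++ ".switch_inst.YNEG.routing_table);\n")
        let tmp := tmp ++ ("\tinitial $readmemh(\"C:/Users/Jiayi/Documents/GitHub/MD_reduction/tables/routing_tables/routing_table" ++ tag ++ "_zpos.txt\",net0.n" ++ tag ++ ".switch_inst.ZPOS.routing_table);\n")
        let tmp := tmp ++ ("\tinitial $readmemh(\"C:/Users/Jiayi/Documents/GitHub/MD_reduction/tables/routing_tables/routing_table" ++ tag ++ "_zneg.txt\",net0.n" ++ tag ++ ".switch_inst.ZNEG.routing_table);\n")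
        let tmp := tmp ++ ("\tinitial $readmemh(\"C:/Users/Jiayi/Documents/GitHub/MD_reduction/tables/multicast_tables/multicast_table" ++ tag ++ "_xpos.txt\",net0.n" ++ tag ++ ".switch_inst.XPOS.multicast_table);\n")
        let tmp := tmp ++ ("\tinitial $readmemh(\"C:/Users/Jiayi/Documents/GitHub/MD_reduction/tables/multicast_tables/multicast_table" ++ tag ++ "_xneg.txt\",net0.n" ++ tag ++ ".switch_inst.XNEG.multicast_table);\n")
        let tmp := tmp ++ ("\tinitial $readmemh(\"C:/Users/Jiayi/Documents/GitHub/MD_reduction/tables/multicast_tables/multicast_table" ++ tag ++ "_ypos.txt\",net0.n" ++ tag ++ ".switch_inst.YPOS.multicast_table);\n")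
        let tmp := tmp ++ ("\tinitial $readmemh(\"C:/Users/Jiayi/Documents/GitHub/MD_reduction/tables/multicast_tables/multicast_table" ++ tag ++ "_yneg.txt\",net0.n" ++ tag ++ ".switch_inst.YNEG.multicast_table);\n")
        let tmp := tmp ++ ("\tinitial $readmemh(\"C:/Users/Jiayi/Documents/GitHub/MD_reduction/tables/multicast_tables/multicast_table" ++ tag ++ "_zpos.txt\",net0.n" ++ tag ++ ".switch_inst.ZPOS.multicast_table);\n")
        let tmp := tmp ++ ("\tinitial $readmemh(\"C:/Users/Jiayi/Documents/GitHub/MD_reduction/tables/multicast_tables/multicast_table" ++ tag ++ "_zneg.txt\",net0.n" ++ tag ++ ".switch_inst.ZNEG.multicast_table);\n")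
        let tmp := tmp ++ ("\tinitial $readmemh(\"C:/Users/Jiayi/Documents/GitHub/MD_reduction/tables/reduction_tables/reduction_table" ++ tag ++ "_xpos.txt\",net0.n" ++ tag ++ ".switch_inst.XPOS.reduction_table);\n")
        let tmp := tmp ++ ("\tinitial $readmemh(\"C:/Users/Jiayi/Documents/GitHub/MD_reduction/tables/reduction_tables/reduction_table" ++ tag ++ "_xneg.txt\",net0.n" ++ tag ++ ".switch_inst.XNEG.reduction_table);\n")
        let tmp := tmp ++ ("\tinitial $readmemh(\"C:/Users/Jiayi/Documents/GitHub/MD_reduction/tables/reduction_tables/reduction_table" ++ tag ++ "_ypos.txt\",net0.n" ++ tag ++ ".switch_inst.YPOS.reduction_table);\n")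
        let tmp := tmp ++ ("\tinitial $readmemh(\"C:/Users/Jiayi/Documents/GitHub/MD_reduction/tables/reduction_tables/reduction_table" ++ tag ++ "_yneg.txt\",net0.n" ++ tag ++ ".switch_inst.YNEG.reduction_table);\n")
        let tmp := tmp ++ ("\tinitial $readmemh(\"C:/Users/Jiayi/Documents/GitHub/MD_reduction/tables/reduction_tables/reduction_table" ++ tag ++ "_zpos.txt\",net0.n" ++ tag ++ ".switch_inst.ZPOS.reduction_table);\n")
        let tmp := tmp ++ ("\tinitial $readmemh(\"C:/Users/Jiayi/Documents/GitHub/MD_reduction/tables/reduction_tables/reduction_table" ++ tag ++ "_zneg.txt\",net0.n" ++ tag ++ ".switch_inst.ZNEG.reduction_table);\n")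
        initial ++ tmp) initial) initial) initial
  initial ++ "\tinitial begin\n\t\tclk=0;\n\t\trst=1;\n\n\t\t#100 rst=0;\n\tend\n"

-- ===== PORT B =====
def pvBase : String := "\tinitial $readmemh(\"C:/Users/Jiayi/Documents/GitHub/MD_reduction/tables/"

def pvTrailer : String := "\tinitial begin\n\t\tclk=0;\n\t\trst=1;\n\n\t\t#100 rst=0;\n\tend\n"

-- (kind, suffix, instance-path) triples derived from the table kinds and direction strings
def pvTrips : List (String × String × String) :=
  (["routing", "multicast", "reduction"]).foldl (fun trips kind =>
    (['x','y','z']).foldl (fun trips axis =>   -- Python: for axis in 'xyz' (a string iterates its characters)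
      (["pos", "neg"]).foldl (fun trips sign =>
        let d := String.ofList [axis] ++ sign   -- Python: d = axis + sign
        trips ++ [(kind, d, "switch_inst." ++ PySem.Str.upper d ++ "." ++ kind ++ "_table")]) trips) trips)
    [("routing", "local", "local_unit_inst.routing_table")]

-- segment list: one node's text is tag.join(pvSegs)
def pvSegs : List String :=
  let st := pvTrips.foldl (fun (st : List String × String) t =>
      (st.1 ++ [st.2 ++ pvBase ++ t.1 ++ "_tables/" ++ t.1 ++ "_table", "_" ++ t.2.1 ++ ".txt\",net0.n"],
       "." ++ t.2.2 ++ ");\n")) (([], ""))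
  st.1 ++ [st.2]

def initial_gen_alt (size : Int) : String :=
  let parts := (PySem.List.pyRange 0 (size * size * size) 1).foldl (fun parts n =>
    let i := PySem.Int.floordiv n (size * size)   -- i, r = divmod(n, size*size)
    let r := PySem.Int.mod n (size * size)
    let j := PySem.Int.floordiv r size            -- j, k = divmod(r, size)
    let k := PySem.Int.mod r size
    parts ++ [PySem.Str.join ("_" ++ PySem.Int.toStr i ++ "_" ++ PySem.Int.toStr j ++ "_" ++ PySem.Int.toStr k) pvSegs]) ([] : List String)
  let parts := parts ++ [pvTrailer]
  PySem.Str.join "" parts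

-- ===== PRECONDITION & SPEC =====
def Spec_initial_gen (size : Int) (out : String) : Prop := out = initial_gen_alt size
instance (size : Int) (out : String) : Decidable (Spec_initial_gen size out) := by unfold Spec_initial_gen; infer_instance

-- ===== CLAIM (what is proved, stated in full; the proofs are below) =====
def Claim_equal_initial_gen : Prop := ∀ (size : Int), Dom_initial_gen size → Spec_initial_gen size (initial_gen size)

-- ===== LEMMAS AND PROOFS =====

-- joining with the empty separator is flattening
theorem pv_join_nil_flatten (l : List (List Char)) : PySem.Chars.join [] l = l.flatten := by
  simp only [PySem.Chars.join, List.intercalate]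
  induction l with
  | nil => simp
  | cons x xs ih =>
    cases xs with
    | nil => simp
    | cons y ys => simp_all [List.intersperse]

theorem pv_join_cons (x : String) (xs : List String) :
    PySem.Str.join "" (x :: xs) = x ++ PySem.Str.join "" xs := by
  rw [← String.toList_inj]; simp [pv_join_nil_flatten]

theorem pv_join_nil : PySem.Str.join "" ([] : List String) = "" := by
  rw [← String.toList_inj]; simp

theorem pv_join_append (l1 l2 : List String) :
    PySem.Str.join "" (l1 ++ l2) = PySem.Str.join "" l1 ++ PySem.Str.join "" l2 := by
  rw [← String.toList_inj]; simp [pv_join_nil_flatten]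

-- a string-accumulating fold is the join of the per-element strings
theorem pv_foldl_strcat {α : Type} (g : α → String) (l : List α) (acc : String) :
    l.foldl (fun a x => a ++ g x) acc = acc ++ PySem.Str.join "" (l.map g) := by
  induction l generalizing acc with
  | nil => rw [List.map_nil, pv_join_nil, String.append_empty, List.foldl_nil]
  | cons x xs ih => rw [List.foldl_cons, ih, List.map_cons, pv_join_cons, String.append_assoc]

-- join of a flatMap nests as a join of joins
theorem pv_cat_flat {α : Type} (f : α → List String) (l : List α) :
    PySem.Str.join "" (l.flatMap f) = PySem.Str.join "" (l.map (fun x => PySem.Str.join "" (f x))) := by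
  induction l with
  | nil => rfl
  | cons x xs ih => rw [List.flatMap_cons, pv_join_append, List.map_cons, pv_join_cons, ih]

-- pvSegs evaluates to its 39 literal segments
theorem pv_join_single (sep x : String) : PySem.Str.join sep [x] = x := by
  rw [← String.toList_inj]; simp [PySem.Chars.join_singleton]

theorem pv_join2 (sep x y : String) (rest : List String) :
    PySem.Str.join sep (x :: y :: rest) = x ++ sep ++ PySem.Str.join sep (y :: rest) := by
  rw [← String.toList_inj]; simp [PySem.Chars.join_cons_cons]

set_option maxRecDepth 1000000 in
theorem pv_segs_eval : pvSegs = ["\tinitial $readmemh(\"C:/Users/Jiayi/Documents/GitHub/MD_reduction/tables/routing_tables/routing_table",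
     "_local.txt\",net0.n",
     ".local_unit_inst.routing_table);\n\tinitial $readmemh(\"C:/Users/Jiayi/Documents/GitHub/MD_reduction/tables/routing_tables/routing_table",
     "_xpos.txt\",net0.n",
     ".switch_inst.XPOS.routing_table);\n\tinitial $readmemh(\"C:/Users/Jiayi/Documents/GitHub/MD_reduction/tables/routing_tables/routing_table",
     "_xneg.txt\",net0.n",
     ".switch_inst.XNEG.routing_table);\n\tinitial $readmemh(\"C:/Users/Jiayi/Documents/GitHub/MD_reduction/tables/routing_tables/routing_table",
     "_ypos.txt\",net0.n",
     ".switch_inst.YPOS.routing_table);\n\tinitial $readmemh(\"C:/Users/Jiayi/Documents/GitHub/MD_reduction/tables/routing_tables/routing_table",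
     "_yneg.txt\",net0.n",
     ".switch_inst.YNEG.routing_table);\n\tinitial $readmemh(\"C:/Users/Jiayi/Documents/GitHub/MD_reduction/tables/routing_tables/routing_table",
     "_zpos.txt\",net0.n",
     ".switch_inst.ZPOS.routing_table);\n\tinitial $readmemh(\"C:/Users/Jiayi/Documents/GitHub/MD_reduction/tables/routing_tables/routing_table",
     "_zneg.txt\",net0.n",
     ".switch_inst.ZNEG.routing_table);\n\tinitial $readmemh(\"C:/Users/Jiayi/Documents/GitHub/MD_reduction/tables/multicast_tables/multicast_table",
     "_xpos.txt\",net0.n",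
     ".switch_inst.XPOS.multicast_table);\n\tinitial $readmemh(\"C:/Users/Jiayi/Documents/GitHub/MD_reduction/tables/multicast_tables/multicast_table",
     "_xneg.txt\",net0.n",
     ".switch_inst.XNEG.multicast_table);\n\tinitial $readmemh(\"C:/Users/Jiayi/Documents/GitHub/MD_reduction/tables/multicast_tables/multicast_table",
     "_ypos.txt\",net0.n",
     ".switch_inst.YPOS.multicast_table);\n\tinitial $readmemh(\"C:/Users/Jiayi/Documents/GitHub/MD_reduction/tables/multicast_tables/multicast_table",
     "_yneg.txt\",net0.n",
     ".switch_inst.YNEG.multicast_table);\n\tinitial $readmemh(\"C:/Users/Jiayi/Documents/GitHub/MD_reduction/tables/multicast_tables/multicast_table",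
     "_zpos.txt\",net0.n",
     ".switch_inst.ZPOS.multicast_table);\n\tinitial $readmemh(\"C:/Users/Jiayi/Documents/GitHub/MD_reduction/tables/multicast_tables/multicast_table",
     "_zneg.txt\",net0.n",
     ".switch_inst.ZNEG.multicast_table);\n\tinitial $readmemh(\"C:/Users/Jiayi/Documents/GitHub/MD_reduction/tables/reduction_tables/reduction_table",
     "_xpos.txt\",net0.n",
     ".switch_inst.XPOS.reduction_table);\n\tinitial $readmemh(\"C:/Users/Jiayi/Documents/GitHub/MD_reduction/tables/reduction_tables/reduction_table",
     "_xneg.txt\",net0.n",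
     ".switch_inst.XNEG.reduction_table);\n\tinitial $readmemh(\"C:/Users/Jiayi/Documents/GitHub/MD_reduction/tables/reduction_tables/reduction_table",
     "_ypos.txt\",net0.n",
     ".switch_inst.YPOS.reduction_table);\n\tinitial $readmemh(\"C:/Users/Jiayi/Documents/GitHub/MD_reduction/tables/reduction_tables/reduction_table",
     "_yneg.txt\",net0.n",
     ".switch_inst.YNEG.reduction_table);\n\tinitial $readmemh(\"C:/Users/Jiayi/Documents/GitHub/MD_reduction/tables/reduction_tables/reduction_table",
     "_zpos.txt\",net0.n",
     ".switch_inst.ZPOS.reduction_table);\n\tinitial $readmemh(\"C:/Users/Jiayi/Documents/GitHub/MD_reduction/tables/reduction_tables/reduction_table",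
     "_zneg.txt\",net0.n",
     ".switch_inst.ZNEG.reduction_table);\n"] := by rfl

-- A's nineteen-statement block for one node is B's tag.join(pvSegs)
set_option maxRecDepth 1000000 in
set_option maxHeartbeats 4000000 in
theorem pv_node_eq (tag : String) :
    ("\tinitial $readmemh(\"C:/Users/Jiayi/Documents/GitHub/MD_reduction/tables/routing_tables/routing_table" ++ tag ++ "_local.txt\",net0.n" ++ tag ++ ".local_unit_inst.routing_table);\n")
      ++ ("\tinitial $readmemh(\"C:/Users/Jiayi/Documents/GitHub/MD_reduction/tables/routing_tables/routing_table" ++ tag ++ "_xpos.txt\",net0.n" ++ tag ++ ".switch_inst.XPOS.routing_table);\n")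
      ++ ("\tinitial $readmemh(\"C:/Users/Jiayi/Documents/GitHub/MD_reduction/tables/routing_tables/routing_table" ++ tag ++ "_xneg.txt\",net0.n" ++ tag ++ ".switch_inst.XNEG.routing_table);\n")
      ++ ("\tinitial $readmemh(\"C:/Users/Jiayi/Documents/GitHub/MD_reduction/tables/routing_tables/routing_table" ++ tag ++ "_ypos.txt\",net0.n" ++ tag ++ ".switch_inst.YPOS.routing_table);\n")
      ++ ("\tinitial $readmemh(\"C:/Users/Jiayi/Documents/GitHub/MD_reduction/tables/routing_tables/routing_table" ++ tag ++ "_yneg.txt\",net0.n" ++ tag ++ ".switch_inst.YNEG.routing_table);\n")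
      ++ ("\tinitial $readmemh(\"C:/Users/Jiayi/Documents/GitHub/MD_reduction/tables/routing_tables/routing_table" ++ tag ++ "_zpos.txt\",net0.n" ++ tag ++ ".switch_inst.ZPOS.routing_table);\n")
      ++ ("\tinitial $readmemh(\"C:/Users/Jiayi/Documents/GitHub/MD_reduction/tables/routing_tables/routing_table" ++ tag ++ "_zneg.txt\",net0.n" ++ tag ++ ".switch_inst.ZNEG.routing_table);\n")
      ++ ("\tinitial $readmemh(\"C:/Users/Jiayi/Documents/GitHub/MD_reduction/tables/multicast_tables/multicast_table" ++ tag ++ "_xpos.txt\",net0.n" ++ tag ++ ".switch_inst.XPOS.multicast_table);\n")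
      ++ ("\tinitial $readmemh(\"C:/Users/Jiayi/Documents/GitHub/MD_reduction/tables/multicast_tables/multicast_table" ++ tag ++ "_xneg.txt\",net0.n" ++ tag ++ ".switch_inst.XNEG.multicast_table);\n")
      ++ ("\tinitial $readmemh(\"C:/Users/Jiayi/Documents/GitHub/MD_reduction/tables/multicast_tables/multicast_table" ++ tag ++ "_ypos.txt\",net0.n" ++ tag ++ ".switch_inst.YPOS.multicast_table);\n")
      ++ ("\tinitial $readmemh(\"C:/Users/Jiayi/Documents/GitHub/MD_reduction/tables/multicast_tables/multicast_table" ++ tag ++ "_yneg.txt\",net0.n" ++ tag ++ ".switch_inst.YNEG.multicast_table);\n")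
      ++ ("\tinitial $readmemh(\"C:/Users/Jiayi/Documents/GitHub/MD_reduction/tables/multicast_tables/multicast_table" ++ tag ++ "_zpos.txt\",net0.n" ++ tag ++ ".switch_inst.ZPOS.multicast_table);\n")
      ++ ("\tinitial $readmemh(\"C:/Users/Jiayi/Documents/GitHub/MD_reduction/tables/multicast_tables/multicast_table" ++ tag ++ "_zneg.txt\",net0.n" ++ tag ++ ".switch_inst.ZNEG.multicast_table);\n")
      ++ ("\tinitial $readmemh(\"C:/Users/Jiayi/Documents/GitHub/MD_reduction/tables/reduction_tables/reduction_table" ++ tag ++ "_xpos.txt\",net0.n" ++ tag ++ ".switch_inst.XPOS.reduction_table);\n")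
      ++ ("\tinitial $readmemh(\"C:/Users/Jiayi/Documents/GitHub/MD_reduction/tables/reduction_tables/reduction_table" ++ tag ++ "_xneg.txt\",net0.n" ++ tag ++ ".switch_inst.XNEG.reduction_table);\n")
      ++ ("\tinitial $readmemh(\"C:/Users/Jiayi/Documents/GitHub/MD_reduction/tables/reduction_tables/reduction_table" ++ tag ++ "_ypos.txt\",net0.n" ++ tag ++ ".switch_inst.YPOS.reduction_table);\n")
      ++ ("\tinitial $readmemh(\"C:/Users/Jiayi/Documents/GitHub/MD_reduction/tables/reduction_tables/reduction_table" ++ tag ++ "_yneg.txt\",net0.n" ++ tag ++ ".switch_inst.YNEG.reduction_table);\n")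
      ++ ("\tinitial $readmemh(\"C:/Users/Jiayi/Documents/GitHub/MD_reduction/tables/reduction_tables/reduction_table" ++ tag ++ "_zpos.txt\",net0.n" ++ tag ++ ".switch_inst.ZPOS.reduction_table);\n")
      ++ ("\tinitial $readmemh(\"C:/Users/Jiayi/Documents/GitHub/MD_reduction/tables/reduction_tables/reduction_table" ++ tag ++ "_zneg.txt\",net0.n" ++ tag ++ ".switch_inst.ZNEG.reduction_table);\n")
    = PySem.Str.join tag pvSegs := by
  rw [pv_segs_eval]
  simp only [pv_join2, pv_join_single]
  have hm0 : ∀ X : String, ".local_unit_inst.routing_table);\n" ++ ("\tinitial $readmemh(\"C:/Users/Jiayi/Documents/GitHub/MD_reduction/tables/routing_tables/routing_table" ++ X) = ".local_unit_inst.routing_table);\n\tinitial $readmemh(\"C:/Users/Jiayi/Documents/GitHub/MD_reduction/tables/routing_tables/routing_table" ++ X := fun X => by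
    rw [← String.append_assoc]; rfl
  have hm1 : ∀ X : String, ".switch_inst.XPOS.routing_table);\n" ++ ("\tinitial $readmemh(\"C:/Users/Jiayi/Documents/GitHub/MD_reduction/tables/routing_tables/routing_table" ++ X) = ".switch_inst.XPOS.routing_table);\n\tinitial $readmemh(\"C:/Users/Jiayi/Documents/GitHub/MD_reduction/tables/routing_tables/routing_table" ++ X := fun X => by
    rw [← String.append_assoc]; rfl
  have hm2 : ∀ X : String, ".switch_inst.XNEG.routing_table);\n" ++ ("\tinitial $readmemh(\"C:/Users/Jiayi/Documents/GitHub/MD_reduction/tables/routing_tables/routing_table" ++ X) = ".switch_inst.XNEG.routing_table);\n\tinitial $readmemh(\"C:/Users/Jiayi/Documents/GitHub/MD_reduction/tables/routing_tables/routing_table" ++ X := fun X => by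
    rw [← String.append_assoc]; rfl
  have hm3 : ∀ X : String, ".switch_inst.YPOS.routing_table);\n" ++ ("\tinitial $readmemh(\"C:/Users/Jiayi/Documents/GitHub/MD_reduction/tables/routing_tables/routing_table" ++ X) = ".switch_inst.YPOS.routing_table);\n\tinitial $readmemh(\"C:/Users/Jiayi/Documents/GitHub/MD_reduction/tables/routing_tables/routing_table" ++ X := fun X => by
    rw [← String.append_assoc]; rfl
  have hm4 : ∀ X : String, ".switch_inst.YNEG.routing_table);\n" ++ ("\tinitial $readmemh(\"C:/Users/Jiayi/Documents/GitHub/MD_reduction/tables/routing_tables/routing_table" ++ X) = ".switch_inst.YNEG.routing_table);\n\tinitial $readmemh(\"C:/Users/Jiayi/Documents/GitHub/MD_reduction/tables/routing_tables/routing_table" ++ X := fun X => by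
    rw [← String.append_assoc]; rfl
  have hm5 : ∀ X : String, ".switch_inst.ZPOS.routing_table);\n" ++ ("\tinitial $readmemh(\"C:/Users/Jiayi/Documents/GitHub/MD_reduction/tables/routing_tables/routing_table" ++ X) = ".switch_inst.ZPOS.routing_table);\n\tinitial $readmemh(\"C:/Users/Jiayi/Documents/GitHub/MD_reduction/tables/routing_tables/routing_table" ++ X := fun X => by
    rw [← String.append_assoc]; rfl
  have hm6 : ∀ X : String, ".switch_inst.ZNEG.routing_table);\n" ++ ("\tinitial $readmemh(\"C:/Users/Jiayi/Documents/GitHub/MD_reduction/tables/multicast_tables/multicast_table" ++ X) = ".switch_inst.ZNEG.routing_table);\n\tinitial $readmemh(\"C:/Users/Jiayi/Documents/GitHub/MD_reduction/tables/multicast_tables/multicast_table" ++ X := fun X => by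
    rw [← String.append_assoc]; rfl
  have hm7 : ∀ X : String, ".switch_inst.XPOS.multicast_table);\n" ++ ("\tinitial $readmemh(\"C:/Users/Jiayi/Documents/GitHub/MD_reduction/tables/multicast_tables/multicast_table" ++ X) = ".switch_inst.XPOS.multicast_table);\n\tinitial $readmemh(\"C:/Users/Jiayi/Documents/GitHub/MD_reduction/tables/multicast_tables/multicast_table" ++ X := fun X => by
    rw [← String.append_assoc]; rfl
  have hm8 : ∀ X : String, ".switch_inst.XNEG.multicast_table);\n" ++ ("\tinitial $readmemh(\"C:/Users/Jiayi/Documents/GitHub/MD_reduction/tables/multicast_tables/multicast_table" ++ X) = ".switch_inst.XNEG.multicast_table);\n\tinitial $readmemh(\"C:/Users/Jiayi/Documents/GitHub/MD_reduction/tables/multicast_tables/multicast_table" ++ X := fun X => by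
    rw [← String.append_assoc]; rfl
  have hm9 : ∀ X : String, ".switch_inst.YPOS.multicast_table);\n" ++ ("\tinitial $readmemh(\"C:/Users/Jiayi/Documents/GitHub/MD_reduction/tables/multicast_tables/multicast_table" ++ X) = ".switch_inst.YPOS.multicast_table);\n\tinitial $readmemh(\"C:/Users/Jiayi/Documents/GitHub/MD_reduction/tables/multicast_tables/multicast_table" ++ X := fun X => by
    rw [← String.append_assoc]; rfl
  have hm10 : ∀ X : String, ".switch_inst.YNEG.multicast_table);\n" ++ ("\tinitial $readmemh(\"C:/Users/Jiayi/Documents/GitHub/MD_reduction/tables/multicast_tables/multicast_table" ++ X) = ".switch_inst.YNEG.multicast_table);\n\tinitial $readmemh(\"C:/Users/Jiayi/Documents/GitHub/MD_reduction/tables/multicast_tables/multicast_table" ++ X := fun X => by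
    rw [← String.append_assoc]; rfl
  have hm11 : ∀ X : String, ".switch_inst.ZPOS.multicast_table);\n" ++ ("\tinitial $readmemh(\"C:/Users/Jiayi/Documents/GitHub/MD_reduction/tables/multicast_tables/multicast_table" ++ X) = ".switch_inst.ZPOS.multicast_table);\n\tinitial $readmemh(\"C:/Users/Jiayi/Documents/GitHub/MD_reduction/tables/multicast_tables/multicast_table" ++ X := fun X => by
    rw [← String.append_assoc]; rfl
  have hm12 : ∀ X : String, ".switch_inst.ZNEG.multicast_table);\n" ++ ("\tinitial $readmemh(\"C:/Users/Jiayi/Documents/GitHub/MD_reduction/tables/reduction_tables/reduction_table" ++ X) = ".switch_inst.ZNEG.multicast_table);\n\tinitial $readmemh(\"C:/Users/Jiayi/Documents/GitHub/MD_reduction/tables/reduction_tables/reduction_table" ++ X := fun X => by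
    rw [← String.append_assoc]; rfl
  have hm13 : ∀ X : String, ".switch_inst.XPOS.reduction_table);\n" ++ ("\tinitial $readmemh(\"C:/Users/Jiayi/Documents/GitHub/MD_reduction/tables/reduction_tables/reduction_table" ++ X) = ".switch_inst.XPOS.reduction_table);\n\tinitial $readmemh(\"C:/Users/Jiayi/Documents/GitHub/MD_reduction/tables/reduction_tables/reduction_table" ++ X := fun X => by
    rw [← String.append_assoc]; rfl
  have hm14 : ∀ X : String, ".switch_inst.XNEG.reduction_table);\n" ++ ("\tinitial $readmemh(\"C:/Users/Jiayi/Documents/GitHub/MD_reduction/tables/reduction_tables/reduction_table" ++ X) = ".switch_inst.XNEG.reduction_table);\n\tinitial $readmemh(\"C:/Users/Jiayi/Documents/GitHub/MD_reduction/tables/reduction_tables/reduction_table" ++ X := fun X => by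
    rw [← String.append_assoc]; rfl
  have hm15 : ∀ X : String, ".switch_inst.YPOS.reduction_table);\n" ++ ("\tinitial $readmemh(\"C:/Users/Jiayi/Documents/GitHub/MD_reduction/tables/reduction_tables/reduction_table" ++ X) = ".switch_inst.YPOS.reduction_table);\n\tinitial $readmemh(\"C:/Users/Jiayi/Documents/GitHub/MD_reduction/tables/reduction_tables/reduction_table" ++ X := fun X => by
    rw [← String.append_assoc]; rfl
  have hm16 : ∀ X : String, ".switch_inst.YNEG.reduction_table);\n" ++ ("\tinitial $readmemh(\"C:/Users/Jiayi/Documents/GitHub/MD_reduction/tables/reduction_tables/reduction_table" ++ X) = ".switch_inst.YNEG.reduction_table);\n\tinitial $readmemh(\"C:/Users/Jiayi/Documents/GitHub/MD_reduction/tables/reduction_tables/reduction_table" ++ X := fun X => by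
    rw [← String.append_assoc]; rfl
  have hm17 : ∀ X : String, ".switch_inst.ZPOS.reduction_table);\n" ++ ("\tinitial $readmemh(\"C:/Users/Jiayi/Documents/GitHub/MD_reduction/tables/reduction_tables/reduction_table" ++ X) = ".switch_inst.ZPOS.reduction_table);\n\tinitial $readmemh(\"C:/Users/Jiayi/Documents/GitHub/MD_reduction/tables/reduction_tables/reduction_table" ++ X := fun X => by
    rw [← String.append_assoc]; rfl
  simp only [String.append_assoc, hm0, hm1, hm2, hm3, hm4, hm5, hm6, hm7, hm8, hm9, hm10, hm11, hm12, hm13, hm14, hm15, hm16, hm17]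

-- Nat-level divmod decoding of a flat index over a product range
theorem pv_range_decode (a b : Nat) :
    (List.range (a*b)).map (fun n => (n / b, n % b))
      = (List.range a).flatMap (fun i => (List.range b).map (fun j => (i, j))) := by
  induction a with
  | zero => simp
  | succ a ih =>
    rw [Nat.succ_mul, List.range_add, List.map_append, ih, List.range_succ, List.flatMap_append]
    simp only [List.map_map, List.flatMap_cons, List.flatMap_nil, List.append_nil]
    congr 1
    apply List.map_congr_left
    intro k hk
    simp only [List.mem_range] at hk
    have hb : 0 < b := by omega
    have h1 : (a * b + k) / b = a := by rw [Nat.mul_comm, Nat.mul_add_div hb, Nat.div_eq_of_lt hk, Nat.add_zero]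
    have h2 : (a * b + k) % b = k := by rw [Nat.mul_comm, Nat.mul_add_mod, Nat.mod_eq_of_lt hk]
    simp [Function.comp, h1, h2]

-- the flat-index/divmod traversal visits the (i,j,k) triples in nested-loop order
set_option maxRecDepth 4096 in
theorem pv_triples (s : Int) :
    (PySem.List.pyRange 0 (s*s*s) 1).map (fun n =>
        (PySem.Int.floordiv n (s*s), PySem.Int.floordiv (PySem.Int.mod n (s*s)) s, PySem.Int.mod (PySem.Int.mod n (s*s)) s))
      = (PySem.List.pyRange 0 s 1).flatMap (fun i => (PySem.List.pyRange 0 s 1).flatMap (fun j =>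
          (PySem.List.pyRange 0 s 1).map (fun k => (i, j, k)))) := by
  rcases le_or_gt s 0 with hs | hs
  · have h3 : s*s*s ≤ 0 := by nlinarith
    rw [PySem.List.pyRange_one_eq_nil h3, PySem.List.pyRange_one_eq_nil hs]
    simp
  · obtain ⟨m, rfl⟩ : ∃ m : Nat, s = (m : Int) := ⟨s.toNat, (Int.toNat_of_nonneg hs.le).symm⟩
    have hc : (m:Int)*(m:Int)*(m:Int) = ((m*(m*m) : Nat) : Int) := by push_cast; ring
    rw [hc, PySem.List.pyRange_zero_nat, PySem.List.pyRange_zero_nat, List.map_map]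
    have hcast : (m:Int)*(m:Int) = ((m*m : Nat) : Int) := by push_cast; ring
    have hL : ∀ n ∈ List.range (m*(m*m)),
        ((fun n => (PySem.Int.floordiv n ((m:Int)*(m:Int)), PySem.Int.floordiv (PySem.Int.mod n ((m:Int)*(m:Int))) (m:Int), PySem.Int.mod (PySem.Int.mod n ((m:Int)*(m:Int))) (m:Int))) ∘ (fun k : Nat => (k : Int))) n
          = ((fun p : Nat × Nat × Nat => ((p.1 : Int), (p.2.1 : Int), (p.2.2 : Int))) ∘ (fun n : Nat => (n/(m*m), (n%(m*m))/m, (n%(m*m))%m))) n := by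
      intro n _
      simp only [Function.comp, hcast, PySem.Int.floordiv_natCast, PySem.Int.mod_natCast]
    rw [List.map_congr_left hL, ← List.map_map]
    have step1 : (List.range (m*(m*m))).map (fun n : Nat => (n/(m*m), (n%(m*m))/m, (n%(m*m))%m))
        = (List.range m).flatMap (fun i => (List.range m).flatMap (fun j => (List.range m).map (fun k => (i, j, k)))) := by
      have h1 : (List.range (m*(m*m))).map (fun n : Nat => (n/(m*m), (n%(m*m))/m, (n%(m*m))%m))
          = ((List.range (m*(m*m))).map (fun n => (n / (m*m), n % (m*m)))).map (fun p => (p.1, p.2/m, p.2%m)) := by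
        simp [List.map_map, Function.comp]
      rw [h1, pv_range_decode m (m*m), List.map_flatMap]
      apply List.flatMap_congr
      intro i _
      rw [List.map_map]
      have h2 : ((fun p : Nat × Nat => (p.1, p.2/m, p.2%m)) ∘ (fun j => (i, j)))
          = (fun t : Nat × Nat => (i, t.1, t.2)) ∘ (fun r : Nat => (r/m, r%m)) := by
        funext r; simp [Function.comp]
      rw [h2, ← List.map_map, pv_range_decode m m, List.map_flatMap]
      apply List.flatMap_congr
      intro j _
      rw [List.map_map]
      simp [Function.comp]
    rw [step1]
    simp only [List.map_flatMap, List.flatMap_map, List.map_map]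
    apply List.flatMap_congr; intro i _
    apply List.flatMap_congr; intro j _
    simp [Function.comp]

-- ===== VERDICT (by name: the statement is the Claim_ definition above) =====
set_option maxRecDepth 100000 in
set_option maxHeartbeats 2000000 in
theorem initial_gen_spec : Claim_equal_initial_gen := by
  intro size _
  show initial_gen size = initial_gen_alt size
  unfold initial_gen initial_gen_alt
  simp only [pv_node_eq, pv_foldl_strcat, PySem.List.foldl_append_singleton_eq_map,
    List.nil_append, pv_join_append, pv_join_cons, pv_join_nil, String.append_empty,
    String.empty_append, pvTrailer]
  have h := congrArg (List.map (fun t : Int × Int × Int =>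
      PySem.Str.join ("_" ++ PySem.Int.toStr t.1 ++ "_" ++ PySem.Int.toStr t.2.1 ++ "_" ++ PySem.Int.toStr t.2.2) pvSegs))
    (pv_triples size)
  simp only [List.map_map, List.map_flatMap, Function.comp_def] at h
  rw [h]
  simp only [pv_cat_flat]
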